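-- pv_equiv track=rewrite | github.com/8bkmv4dm4z-source/Agentic-Workflows | src/agentic_workflows/orchestration/langgraph/mission_auditor.py | estimate_fib_csv_min_chars
-- ===== SOURCE A (Python) =====
-- def estimate_fib_csv_min_chars(n: int) -> int:
--     """Estimate minimum character count for first N fibonacci numbers as compact CSV."""
--     a, b = 0, 1
--     total = 0
--     for i in range(n):
--         total += len(str(a))
--         if i < n - 1:
--             total += 1  # comma (no space — compact format)
--         a, b = b, a + b
--     return total
-- ===== SOURCE B (Python) =====
-- def estimate_fib_csv_min_chars(n: int) -> int:
--     """Layered counting: digit lengths of Fibonacci numbers are nondecreasing, so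
--     sum(len(str(F_i))) = n + sum over each power-of-ten threshold of the count of
--     indices whose Fibonacci number reaches it; each threshold is crossed exactly
--     once (F grows by a factor < 2 < 10), contributing n - crossing_index."""
--     if n <= 0:
--         return 0
--     total = 2 * n - 1  # one digit per number, plus n-1 commas
--     a, b = 0, 1
--     threshold = 10
--     for i in range(n):
--         if a >= threshold:
--             total += n - i  # this and every later number has one more digit
--             threshold *= 10
--         a, b = b, a + b
--     return total
-- ===== Notes on version B (the rewrite author's own statement) =====
-- stated objective: faster
-- what changed: B never measures any number's digit length: instead of summing len(str(F_i)) per element, it uses a layered-counting argument (digit lengths are nondecreasing, each power-of-ten threshold is crossed exactly once since F grows by a factor < 2) and adds n - i once per threshold crossing to a 2n-1 baseline.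
import Mathlib
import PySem

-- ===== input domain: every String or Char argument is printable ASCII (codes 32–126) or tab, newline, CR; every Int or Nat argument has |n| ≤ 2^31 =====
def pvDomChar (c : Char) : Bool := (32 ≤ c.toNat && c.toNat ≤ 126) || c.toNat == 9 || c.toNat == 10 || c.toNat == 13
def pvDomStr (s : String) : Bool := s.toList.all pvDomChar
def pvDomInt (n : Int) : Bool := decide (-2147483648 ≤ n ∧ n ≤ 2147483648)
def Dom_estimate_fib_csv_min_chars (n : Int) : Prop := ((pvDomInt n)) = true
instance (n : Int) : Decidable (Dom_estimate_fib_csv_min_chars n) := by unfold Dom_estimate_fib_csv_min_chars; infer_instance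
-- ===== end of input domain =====

-- B counts, per power-of-ten threshold, how many Fibonacci numbers reach it (layered
-- counting over a 2n-1 baseline) instead of measuring each number's digit length
-- (objective: faster — no string is ever built).

-- ===== PORT A =====
def estimate_fib_csv_min_chars (n : Int) : Int :=
  let r := (PySem.List.pyRange 0 n 1).foldl
    (fun (s : Int × Int × Int) (i : Int) =>
      let a := s.1
      let b := s.2.1
      let total := s.2.2 + PySem.Str.len (PySem.Int.toStr a)
      let total := if i < n - 1 then total + 1 else total
      (b, a + b, total))
    (0, 1, 0)
  r.2.2

-- ===== PORT B =====
def estimate_fib_csv_min_chars_alt (n : Int) : Int :=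
  if n ≤ 0 then 0
  else
    let r := (PySem.List.pyRange 0 n 1).foldl
      (fun (s : Int × Int × Int × Int) (i : Int) =>
        if s.2.2.1 ≤ s.1 then
          (s.2.1, s.1 + s.2.1, s.2.2.1 * 10, s.2.2.2 + (n - i))
        else
          (s.2.1, s.1 + s.2.1, s.2.2.1, s.2.2.2))
      (0, 1, 10, 2 * n - 1)
    r.2.2.2

-- ===== PRECONDITION & SPEC =====
def Spec_estimate_fib_csv_min_chars (n : Int) (out : Int) : Prop := out = estimate_fib_csv_min_chars_alt n
instance (n : Int) (out : Int) : Decidable (Spec_estimate_fib_csv_min_chars n out) := by unfold Spec_estimate_fib_csv_min_chars; infer_instance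

-- ===== CLAIM (what is proved, stated in full; the proofs are below) =====
def Claim_equal_estimate_fib_csv_min_chars : Prop := ∀ (n : Int), Dom_estimate_fib_csv_min_chars n → Spec_estimate_fib_csv_min_chars n (estimate_fib_csv_min_chars n)

-- ===== LEMMAS AND PROOFS =====

-- proof-side names for the two loop bodies (definitionally the lambdas in the ports)
def pvStepA (n : Int) : (Int × Int × Int) → Int → (Int × Int × Int) :=
  fun s i =>
    let a := s.1
    let b := s.2.1
    let total := s.2.2 + PySem.Str.len (PySem.Int.toStr a)
    let total := if i < n - 1 then total + 1 else total
    (b, a + b, total)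

def pvStepB (n : Int) : (Int × Int × Int × Int) → Int → (Int × Int × Int × Int) :=
  fun s i =>
    if s.2.2.1 ≤ s.1 then
      (s.2.1, s.1 + s.2.1, s.2.2.1 * 10, s.2.2.2 + (n - i))
    else
      (s.2.1, s.1 + s.2.1, s.2.2.1, s.2.2.2)

-- decimal digit count of a natural number, as Python's len(str(m)) computes it
def pvL (m : Nat) : Nat := (Nat.toDigits 10 m).length

lemma pvL_le_iff {m k : Nat} (hk : 0 < k) : pvL m ≤ k ↔ m < 10 ^ k :=
  Nat.length_toDigits_le_iff (by norm_num) hk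

lemma pvL_pos (m : Nat) : 0 < pvL m := Nat.length_toDigits_pos

lemma pvL_between {aN bN : Nat} (h1 : aN ≤ bN) (h2 : bN ≤ 2 * aN + 1) :
    pvL aN ≤ pvL bN ∧ pvL bN ≤ pvL aN + 1 := by
  have hb : bN < 10 ^ pvL bN := (pvL_le_iff (pvL_pos bN)).1 le_rfl
  have ha : aN < 10 ^ pvL aN := (pvL_le_iff (pvL_pos aN)).1 le_rfl
  constructor
  · exact (pvL_le_iff (pvL_pos bN)).2 (lt_of_le_of_lt h1 hb)
  · apply (pvL_le_iff (by omega)).2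
    have hpow : 10 ^ (pvL aN + 1) = 10 * 10 ^ pvL aN := by ring
    omega

lemma pv_len_toStr (a : Int) (h : 0 ≤ a) :
    PySem.Str.len (PySem.Int.toStr a) = (pvL a.toNat : Int) := by
  simp [PySem.Str.len_eq, PySem.Int.toList_toStr, PySem.Int.toChars, not_lt.2 h, pvL]

-- loop invariant: A's running total exceeds B's by the already-booked layers
-- d·(n−k) plus the pending commas, where d is the current digit count
lemma pv_loop (m : Nat) : ∀ (k n a b tA tB thI : Int) (d : Nat),
    (n - k).toNat = m → k ≤ n →
    0 ≤ a → a ≤ b → b ≤ 2 * a + 1 → 1 ≤ d → thI = (10 : Int) ^ d →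
    (pvL a.toNat = d ∨ pvL a.toNat = d + 1) →
    ((PySem.List.pyRange k n 1).foldl (pvStepA n) (a, b, tA)).2.2
      = ((PySem.List.pyRange k n 1).foldl (pvStepB n) (a, b, thI, tB)).2.2.2
        + (tA - tB) + (d : Int) * (n - k) + (if k < n then n - k - 1 else 0) := by
  induction m with
  | zero =>
    intro k n a b tA tB thI d hm hkn0 ha hab hba hd hth hL
    rw [PySem.List.pyRange_one_eq_nil (by omega)]
    simp only [List.foldl_nil]
    rw [if_neg (by omega)]
    have : (n : Int) - k = 0 := by omega
    rw [this]
    ring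
  | succ m ih =>
    intro k n a b tA tB thI d hm hkn0 ha hab hba hd hth hL
    have hk : k < n := by omega
    rw [PySem.List.pyRange_one_cons hk]
    simp only [List.foldl_cons, pvStepA, pvStepB]
    rw [pv_len_toStr a ha]
    have haN : a.toNat < 10 ^ pvL a.toNat := (pvL_le_iff (pvL_pos _)).1 le_rfl
    have hbetw := pvL_between (aN := a.toNat) (bN := b.toNat) (by omega) (by omega)
    have hb0 : (0:Int) ≤ b := le_trans ha hab
    by_cases h10 : thI ≤ a
    · -- a has crossed the threshold: its digit count is d + 1, B books the layer n - k
      have hge : 10 ^ d ≤ a.toNat := by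
        have : ((10 ^ d : Nat) : Int) = (10:Int) ^ d := by push_cast; ring
        omega
      have hLa : pvL a.toNat = d + 1 := by
        have : ¬ (pvL a.toNat ≤ d) := by rw [pvL_le_iff hd]; omega
        omega
      rw [if_pos h10]
      by_cases hc : k < n - 1
      · rw [if_pos hc]
        rw [ih (k+1) n b (a+b) _ (tB + (n - k)) (thI * 10) (d+1)
          (by omega) (by omega) hb0 (by omega) (by omega) (by omega)
          (by rw [hth]; ring) (by omega)]
        rw [if_pos hk, if_pos (show k + 1 < n by omega), hLa]
        push_cast; ring
      · rw [if_neg hc]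
        rw [ih (k+1) n b (a+b) _ (tB + (n - k)) (thI * 10) (d+1)
          (by omega) (by omega) hb0 (by omega) (by omega) (by omega)
          (by rw [hth]; ring) (by omega)]
        rw [if_pos hk, if_neg (show ¬ (k + 1 < n) by omega), hLa]
        have hkn : n = k + 1 := by omega
        subst hkn
        push_cast; ring
    · -- still below the threshold: digit count is d, B adds nothing
      have hlt : a.toNat < 10 ^ d := by
        have : ((10 ^ d : Nat) : Int) = (10:Int) ^ d := by push_cast; ring
        omega
      have hLa : pvL a.toNat = d := by
        have : pvL a.toNat ≤ d := (pvL_le_iff hd).2 hlt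
        omega
      rw [if_neg h10]
      by_cases hc : k < n - 1
      · rw [if_pos hc]
        rw [ih (k+1) n b (a+b) _ tB thI d
          (by omega) (by omega) hb0 (by omega) (by omega) hd hth (by omega)]
        rw [if_pos hk, if_pos (show k + 1 < n by omega), hLa]
        ring
      · rw [if_neg hc]
        rw [ih (k+1) n b (a+b) _ tB thI d
          (by omega) (by omega) hb0 (by omega) (by omega) hd hth (by omega)]
        rw [if_pos hk, if_neg (show ¬ (k + 1 < n) by omega), hLa]
        have hkn : n = k + 1 := by omega
        subst hkn
        ring

-- ===== VERDICT (by name: the statement is the Claim_ definition above) =====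
theorem estimate_fib_csv_min_chars_spec : Claim_equal_estimate_fib_csv_min_chars := by
  intro n _
  unfold Spec_estimate_fib_csv_min_chars
  by_cases hn : n ≤ 0
  · show estimate_fib_csv_min_chars n = estimate_fib_csv_min_chars_alt n
    unfold estimate_fib_csv_min_chars estimate_fib_csv_min_chars_alt
    rw [if_pos hn, PySem.List.pyRange_one_eq_nil (by omega)]
    simp
  · have H := pv_loop (n - 0).toNat 0 n 0 1 0 (2 * n - 1) 10 1
      rfl (by omega) le_rfl (by norm_num) (by norm_num) le_rfl (by norm_num)
      (by left; decide)
    rw [if_pos (by omega : (0:Int) < n)] at H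
    show (((PySem.List.pyRange 0 n 1).foldl (pvStepA n) (0, 1, 0)).2.2 : Int)
        = (if n ≤ 0 then 0 else
            ((PySem.List.pyRange 0 n 1).foldl (pvStepB n) (0, 1, 10, 2 * n - 1)).2.2.2)
    rw [if_neg hn, H]
    ring
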